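-- pv_equiv track=rewrite | github.com/bomsoo-kim/text_tools | longest_common_token_sequence.py | count_consecutive_initials
-- ===== SOURCE A (Python) =====
-- def count_consecutive_initials(ii, i_not_set):
--     conn = [0] * len(ii)
--     for k,v in ii.items():
--         if k not in i_not_set:
--             conn[v] = 1
--
--     cnt = 0
--     for i in range(len(conn)):
--         if conn[i] > 0 and (i == 0 or conn[i-1] == 0):
--             cnt += 1
--
--     return cnt
-- ===== SOURCE B (Python) =====
-- def count_consecutive_initials(ii, i_not_set):
--     vals = sorted({v for k, v in ii.items() if k not in i_not_set})
--     if not vals: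
--         return 0
--     return 1 + sum(1 for a, b in zip(vals, vals[1:]) if b - a > 1)
-- ===== Notes on version B (the rewrite author's own statement) =====
-- stated objective: alternative
-- what changed: Replaces A's dense 0/1 marker array plus full positional scan of range(len(ii)) by sorting the distinct kept values and counting runs as 1 + the number of adjacent gaps > 1 in the sorted sequence.
-- outside the precondition, e.g. on count_consecutive_initials({'a': 0, 'b': -2}, set()): A returns 1, B returns 2; on count_consecutive_initials({'a': -1}, set()): A returns 1, B returns 1
import Mathlib
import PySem

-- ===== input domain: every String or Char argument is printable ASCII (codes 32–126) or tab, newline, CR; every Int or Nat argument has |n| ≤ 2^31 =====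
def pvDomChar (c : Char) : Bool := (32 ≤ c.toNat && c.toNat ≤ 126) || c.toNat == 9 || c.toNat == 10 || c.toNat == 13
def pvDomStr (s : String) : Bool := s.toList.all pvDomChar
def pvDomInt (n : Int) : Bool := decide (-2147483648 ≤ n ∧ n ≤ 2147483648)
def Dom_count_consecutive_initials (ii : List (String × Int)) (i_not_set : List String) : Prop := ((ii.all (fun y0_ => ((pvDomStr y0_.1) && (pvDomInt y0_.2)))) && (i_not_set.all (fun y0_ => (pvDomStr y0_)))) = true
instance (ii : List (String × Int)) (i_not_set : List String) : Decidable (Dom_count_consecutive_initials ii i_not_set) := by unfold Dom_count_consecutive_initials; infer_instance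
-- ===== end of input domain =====

-- B drops A's dense 0/1 marker array and full positional scan: it sorts the distinct
-- kept values and counts runs as 1 + (number of adjacent gaps > 1); alternative, no faster.

-- ===== PORT A =====
def count_consecutive_initials (ii : List (String × Int)) (i_not_set : List String) : Int :=
  let d := PySem.Dict.ofList ii
  let conn : List Int := List.replicate d.size 0
  let conn := d.items.foldl (fun conn kv =>
    if i_not_set.contains kv.1 then conn
    else PySem.List.pySetD conn kv.2 1) conn
  (PySem.List.pyRange 0 (PySem.List.len conn) 1).foldl (fun cnt i =>
    if 0 < PySem.List.pyGetD conn i 0 ∧ (i = 0 ∨ PySem.List.pyGetD conn (i - 1) 0 = 0)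
    then cnt + 1 else cnt) (0 : Int)

-- ===== PORT B =====
def count_consecutive_initials_alt (ii : List (String × Int)) (i_not_set : List String) : Int :=
  let d := PySem.Dict.ofList ii
  let vals : List Int := PySem.List.sorted
    (PySem.Set.ofList ((d.items.filter (fun kv => !(i_not_set.contains kv.1))).map (fun kv => kv.2)))
    (fun x => x) false
  match vals with
  | [] => 0
  | _ :: _ =>
    1 + (vals.zip (vals.drop 1)).foldl (fun c p => if 1 < p.2 - p.1 then c + 1 else c) 0

-- ===== PRECONDITION & SPEC =====
-- Pre_ restricts to the function's natural domain, where every kept token's value is a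
-- valid position 0 ≤ v < len(ii) in the marker array: values ≥ len(ii) (or < -len(ii))
-- make A raise IndexError, and negative in-range values hit Python's accidental
-- negative-index wraparound of the marker array, which B's sort-and-gaps algorithm has
-- no reason to reproduce.
def Pre_count_consecutive_initials (ii : List (String × Int)) (i_not_set : List String) : Prop :=
  ∀ kv ∈ (PySem.Dict.ofList ii).items, kv.1 ∉ i_not_set →
    0 ≤ kv.2 ∧ kv.2 < ((PySem.Dict.ofList ii).size : Int)
instance (ii : List (String × Int)) (i_not_set : List String) : Decidable (Pre_count_consecutive_initials ii i_not_set) := by unfold Pre_count_consecutive_initials; infer_instance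

def pvWitness_count_consecutive_initials : (List (String × Int)) × List String :=
  ([("a", 0), ("b", 1), ("c", 1)], ["b"])

def Spec_count_consecutive_initials (ii : List (String × Int)) (i_not_set : List String) (out : Int) : Prop := out = count_consecutive_initials_alt ii i_not_set
instance (ii : List (String × Int)) (i_not_set : List String) (out : Int) : Decidable (Spec_count_consecutive_initials ii i_not_set out) := by unfold Spec_count_consecutive_initials; infer_instance

-- ===== CLAIM (what is proved, stated in full; the proofs are below) =====
def Claim_equal_count_consecutive_initials : Prop := ∀ (ii : List (String × Int)) (i_not_set : List String), Dom_count_consecutive_initials ii i_not_set → Pre_count_consecutive_initials ii i_not_set → Spec_count_consecutive_initials ii i_not_set (count_consecutive_initials ii i_not_set)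

-- ===== LEMMAS AND PROOFS =====

-- a loop with a guard is a fold over the filtered list
theorem foldl_guard_filter {α β : Type} (p : α → Bool) (f : β → α → β) :
    ∀ (l : List α) (init : β),
      l.foldl (fun s x => if p x then s else f s x) init = (l.filter (fun x => !p x)).foldl f init := by
  intro l
  induction l with
  | nil => intro init; rfl
  | cons x xs ih =>
    intro init
    by_cases hp : p x = true
    · simp [List.foldl_cons, hp, ih]
    · simp at hp
      simp [List.foldl_cons, hp, ih]

-- a counting loop is countP
theorem foldl_count {α : Type} (p : α → Prop) [DecidablePred p] :
    ∀ (l : List α) (c : Int),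
      l.foldl (fun c x => if p x then c + 1 else c) c = c + (l.countP (fun x => decide (p x)) : Int) := by
  intro l
  induction l with
  | nil => intro c; simp
  | cons x xs ih =>
    intro c
    by_cases hp : p x
    · simp [List.foldl_cons, hp, ih]; ring
    · simp [List.foldl_cons, hp, ih]

-- the marker array after the writing loop
theorem marker_spec :
    ∀ (vals : List Int) (conn : List Int),
      (∀ v ∈ vals, 0 ≤ v ∧ v < (conn.length : Int)) →
      ((vals.foldl (fun c v => PySem.List.pySetD c v 1) conn).length = conn.length ∧
       ∀ i : Int, 0 ≤ i → i < (conn.length : Int) →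
         PySem.List.pyGetD (vals.foldl (fun c v => PySem.List.pySetD c v 1) conn) i 0 =
           if i ∈ vals then 1 else PySem.List.pyGetD conn i 0) := by
  intro vals
  induction vals with
  | nil => intro conn _; exact ⟨rfl, fun i _ _ => by simp⟩
  | cons v vs ih =>
    intro conn h
    have hv := h v (by simp)
    have hset : PySem.List.pySetD conn v 1 = conn.set v.toNat 1 :=
      PySem.List.pySetD_of_nonneg conn 1 hv.1
    have hlen : (PySem.List.pySetD conn v 1).length = conn.length := by
      rw [hset]; simp
    have ih' := ih (PySem.List.pySetD conn v 1)
      (by intro w hw; rw [hlen]; exact h w (by simp [hw]))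
    refine ⟨by rw [List.foldl_cons, ih'.1, hlen], ?_⟩
    intro i hi0 hilt
    rw [List.foldl_cons, ih'.2 i hi0 (by rw [hlen]; exact hilt)]
    by_cases hmem : i ∈ vs
    · simp [hmem]
    · have hget : PySem.List.pyGetD (PySem.List.pySetD conn v 1) i 0 =
          if i = v then 1 else PySem.List.pyGetD conn i 0 := by
        rw [hset]
        rw [PySem.List.pyGetD_eq_getElem _ 0 hi0 (by simpa using hilt),
            PySem.List.pyGetD_eq_getElem conn 0 hi0 hilt]
        rw [List.getElem_set]
        by_cases hiv : i = v
        · simp [hiv]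
        · have : v.toNat ≠ i.toNat := by omega
          simp [this, hiv]
      by_cases hiv : i = v
      · subst hiv
        simp [hmem, hget]
      · simp [hmem, hiv, hget]

-- on a strictly increasing nonempty list, the elements without a predecessor in the
-- list are counted by 1 + the number of adjacent gaps > 1
theorem runs_of_sorted :
    ∀ (t : List Int) (a : Int), (a :: t).Pairwise (· < ·) →
      (a :: t).countP (fun x => !decide ((x - 1) ∈ (a :: t))) =
        1 + ((a :: t).zip t).countP (fun p => decide (1 < p.2 - p.1)) := by
  intro t
  induction t with
  | nil =>
    intro a _
    simp [show a - 1 ≠ a by omega]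
  | cons b t' ih =>
    intro a h
    have hall : ∀ x ∈ b :: t', a < x := fun x hx => (List.pairwise_cons.mp h).1 x hx
    have ht : (b :: t').Pairwise (· < ·) := (List.pairwise_cons.mp h).2
    have hallb : ∀ x ∈ t', b < x := fun x hx => (List.pairwise_cons.mp ht).1 x hx
    have hab : a < b := hall b (by simp)
    have hpa : (a - 1) ∉ (a :: b :: t') := by
      intro hc
      rcases List.mem_cons.mp hc with h1 | h1
      · omega
      · have := hall _ h1; omega
    have hpb : ((b - 1) ∈ (a :: b :: t')) ↔ b - a = 1 := by
      constructor
      · intro hc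
        rcases List.mem_cons.mp hc with h1 | h1
        · omega
        · rcases List.mem_cons.mp h1 with h2 | h2
          · omega
          · have := hallb _ h2; omega
      · intro hc
        have : b - 1 = a := by omega
        simp [this]
    have hpb' : (b - 1) ∉ (b :: t') := by
      intro hc
      rcases List.mem_cons.mp hc with h1 | h1
      · omega
      · have := hallb _ h1; omega
    -- for x ∈ t', membership of x-1 in the full list equals membership in b::t'
    have hcong : t'.countP (fun x => !decide ((x - 1) ∈ (a :: b :: t'))) =
        t'.countP (fun x => !decide ((x - 1) ∈ (b :: t'))) := by
      apply List.countP_congr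
      intro x hx
      have hbx : b < x := hallb x hx
      have : ((x - 1) ∈ (a :: b :: t')) ↔ ((x - 1) ∈ (b :: t')) := by
        constructor
        · intro hc
          rcases List.mem_cons.mp hc with h1 | h1
          · omega
          · exact h1
        · intro hc; exact List.mem_cons_of_mem a hc
      simp [this]
    have hb : (!decide ((b - 1) ∈ (a :: b :: t'))) = decide (1 < b - a) := by
      by_cases hg : b - a = 1
      · have h' : (b - 1) ∈ (a :: b :: t') := hpb.mpr hg
        simp [h', show ¬ (1 < b - a) by omega]
      · have h' : (b - 1) ∉ (a :: b :: t') := fun hc => hg (hpb.mp hc)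
        simp [h', show (1 : Int) < b - a by omega]
    have ha : (!decide ((a - 1) ∈ (a :: b :: t'))) = true := by simp [hpa]
    have ihb := ih b ht
    rw [List.countP_cons] at ihb
    have hb2 : (!decide ((b - 1) ∈ (b :: t'))) = true := by simp [hpb']
    rw [hb2] at ihb
    simp only [if_true] at ihb
    rw [List.countP_cons, List.countP_cons, hcong, hb, ha,
      List.zip_cons_cons, List.countP_cons]
    have hproj : decide (1 < ((a, b).2 - (a, b).1 : Int)) = decide (1 < b - a) := rfl
    rw [hproj]
    simp only [if_true]
    by_cases hg : (1 : Int) < b - a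
    · rw [if_pos (by simp [hg])]
      omega
    · rw [if_neg (by simp [hg])]
      omega

-- ===== VERDICT (by name: the statement is the Claim_ definition above) =====
theorem count_consecutive_initials_spec : Claim_equal_count_consecutive_initials := by
  intro ii i_not_set _ hpre
  simp only [Spec_count_consecutive_initials, count_consecutive_initials,
    count_consecutive_initials_alt]
  set d := PySem.Dict.ofList ii with hd
  set kept := d.items.filter (fun kv => !(i_not_set.contains kv.1)) with hkept
  set vals := kept.map (fun kv => kv.2) with hvals
  set S := PySem.Set.ofList vals with hS
  set L := PySem.List.sorted S (fun x => x) false with hL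
  -- bounds on the marked values, from Pre_
  have hbound : ∀ v ∈ vals, 0 ≤ v ∧ v < (d.size : Int) := by
    intro v hv
    rw [hvals] at hv
    obtain ⟨kv, hkv, rfl⟩ := List.mem_map.mp hv
    rw [hkept] at hkv
    have hf := List.mem_filter.mp hkv
    exact hpre kv hf.1 (by simpa using hf.2)
  -- L is a strictly increasing rearrangement of the distinct values
  have hperm : L.Perm S := PySem.List.sorted_perm S (fun x => x) false
  have hsorted : L.Pairwise (· < ·) := by
    rw [hL, hS]; exact PySem.List.sorted_ofList_pairwise_lt vals
  have hmemL : ∀ x : Int, x ∈ L ↔ x ∈ vals := by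
    intro x
    rw [hperm.mem_iff, hS]
    exact PySem.Set.mem_ofList vals x
  -- the writing loop is a fold over the marked values
  rw [foldl_guard_filter, ← hkept]
  have hfold : kept.foldl (fun c kv => PySem.List.pySetD c kv.2 1) (List.replicate d.size (0:Int)) =
      vals.foldl (fun c v => PySem.List.pySetD c v 1) (List.replicate d.size (0:Int)) := by
    rw [hvals, List.foldl_map]
  rw [hfold]
  set conn := vals.foldl (fun c v => PySem.List.pySetD c v 1) (List.replicate d.size (0:Int)) with hconn
  have hm := marker_spec vals (List.replicate d.size (0:Int)) (by simpa using hbound)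
  have hlen : conn.length = d.size := by rw [hconn, hm.1, List.length_replicate]
  have hget : ∀ i : Int, 0 ≤ i → i < (d.size : Int) →
      PySem.List.pyGetD conn i 0 = if i ∈ vals then 1 else 0 := by
    intro i h0 h1
    rw [hconn, hm.2 i h0 (by simpa using h1)]
    by_cases hm' : i ∈ vals
    · simp [hm']
    · rw [if_neg hm', if_neg hm',
        PySem.List.pyGetD_eq_getElem _ 0 h0 (by simpa using h1)]
      simp
  -- A's counting loop is countP over the scanned range
  rw [foldl_count (fun i => 0 < PySem.List.pyGetD conn i 0 ∧
        (i = 0 ∨ PySem.List.pyGetD conn (i - 1) 0 = 0))]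
  simp only [zero_add]
  have hrange : PySem.List.pyRange 0 (PySem.List.len conn) 1 =
      PySem.List.pyRange 0 (d.size : Int) 1 := by
    rw [PySem.List.len_eq, hlen]
  rw [hrange]
  -- pointwise: A's run-start test is "marked, and predecessor unmarked"
  have hstep1 : (PySem.List.pyRange 0 (d.size : Int) 1).countP
        (fun i => decide (0 < PySem.List.pyGetD conn i 0 ∧
          (i = 0 ∨ PySem.List.pyGetD conn (i - 1) 0 = 0))) =
      (PySem.List.pyRange 0 (d.size : Int) 1).countP
        (fun i => (!decide ((i - 1) ∈ L)) && decide (i ∈ vals)) := by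
    apply List.countP_congr
    intro i hi
    have hib := PySem.List.mem_pyRange_one.mp hi
    rw [hget i hib.1 hib.2]
    by_cases h0 : i = 0
    · subst h0
      have hneg : (-1 : Int) ∉ vals := fun hc => by have := hbound _ hc; omega
      have hnegL : (-1 : Int) ∉ L := by rw [hmemL]; exact hneg
      by_cases hmem : (0 : Int) ∈ vals <;> simp [hmem, hnegL]
    · have h1 : (0:Int) ≤ i - 1 := by omega
      have h2 : i - 1 < (d.size : Int) := by omega
      rw [hget (i - 1) h1 h2]
      by_cases hmem : i ∈ vals <;> by_cases hpred : i - 1 ∈ vals <;>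
        simp [hmem, hpred, h0, hmemL]
  rw [hstep1, ← List.countP_filter]
  -- the marked positions of the range are a permutation of L
  have hperm2 : ((PySem.List.pyRange 0 (d.size : Int) 1).filter
      (fun i => decide (i ∈ vals))).Perm L := by
    rw [List.perm_ext_iff_of_nodup
      ((PySem.List.nodup_pyRange_one 0 (d.size : Int)).filter _)
      (hperm.nodup_iff.mpr (by rw [hS]; exact PySem.Set.nodup_ofList vals))]
    intro a
    rw [List.mem_filter, hmemL]
    simp only [decide_eq_true_eq]
    constructor
    · exact fun h => h.2
    · intro h
      exact ⟨PySem.List.mem_pyRange_one.mpr (hbound a h), h⟩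
  rw [hperm2.countP_eq]
  -- A is now the number of elements of L without a predecessor in L; apply the run count
  cases hLc : L with
  | nil => simp
  | cons x xs =>
    have hs' : (x :: xs).Pairwise (· < ·) := hLc ▸ hsorted
    rw [runs_of_sorted xs x hs',
      foldl_count (fun p : Int × Int => 1 < p.2 - p.1)]
    simp only [List.drop_one, List.tail_cons]
    push_cast
    ring
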